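-- pv_equiv track=rewrite | github.com/N1kor4/TIPE_PC | Python/Fonctions.py | Courbe
-- ===== SOURCE A (Python) =====
-- def Courbe(Image):
--     Image = [[Image[j][i] for j in range(len(Image))] for i in range(len(Image[0]) - 1, -1, -1)]
--     # on tourne la matrice parce au'on va parcourir l'image ligne par ligne mais comme on veut reperer le 1er point
--     # sur chaque colone, on tourne la matrice de 90 degre
--     X, Y = [], []  # on cree la liste de nos coordonnees
--     coordX = -1  # on commence a l'origine x=0
--     for i in Image:  # on parcourt les colones (la ce sont les lignes de l'image d'au dessus)
--         coordX += 1  # on incremente X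
--         lst = []
--         coordY = -1
--         for j in i:  # on parcourt les lignes
--             coordY += 1
--             if j == 0:  # on prend tous les pts noirs
--                 lst.append(coordY)
--         if len(lst) != 0:  # si il y a des pts pts noirs sur une lignes
--             coordY = lst[0]  # on prend le 1er de ces elements
--             X.append(coordX)
--             Y.append(coordY)
--     return X, Y
-- ===== SOURCE B (Python) =====
-- def Courbe(Image):
--     w = len(Image[0])
--     first = {}                       # column -> row index of its first black pixel
--     for b, row in enumerate(Image):  # one row-major pass over the original image
--         for col in range(w):
--             if row[col] == 0 and col not in first:
--                 first[col] = b
--     X, Y = [], []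
--     for coordX, col in enumerate(range(w - 1, -1, -1)):
--         if col in first:
--             X.append(coordX)
--             Y.append(first[col])
--     return X, Y
-- ===== Notes on version B (the rewrite author's own statement) =====
-- stated objective: alternative
-- what changed: B never rotates the image and never scans column-by-column: a single row-major pass over the original image builds a dictionary mapping each column to the row of its first black pixel, and a second pass over the columns right-to-left just looks each column up, instead of A's building the 90-degree-rotated matrix and collecting all zero indices of each rotated row to take the first.
import Mathlib
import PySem

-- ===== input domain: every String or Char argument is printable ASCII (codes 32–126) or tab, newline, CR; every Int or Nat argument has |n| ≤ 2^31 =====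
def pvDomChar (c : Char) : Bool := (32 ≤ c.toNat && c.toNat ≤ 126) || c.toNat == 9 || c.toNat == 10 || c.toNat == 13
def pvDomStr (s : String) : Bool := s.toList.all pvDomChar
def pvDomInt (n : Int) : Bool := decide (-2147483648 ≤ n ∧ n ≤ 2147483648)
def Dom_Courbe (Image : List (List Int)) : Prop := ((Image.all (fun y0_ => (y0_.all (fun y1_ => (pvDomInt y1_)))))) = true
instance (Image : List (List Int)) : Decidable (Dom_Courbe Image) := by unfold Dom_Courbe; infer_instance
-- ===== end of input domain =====

-- B replaces A's rotate-then-scan-columns strategy by a single row-major pass that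
-- records, in a dictionary, the first black row seen for each column, followed by a
-- lookup pass over the columns right-to-left (objective: alternative algorithm).

-- ===== PORT A =====
-- inner loop body of A: collect the indices of all zeros, tracking coordY
def CourbeInnerStep (p : List Int × Int) (j : Int) : List Int × Int :=
  let coordY := p.2 + 1
  if j = 0 then (p.1 ++ [coordY], coordY) else (p.1, coordY)

-- outer loop body of A over the rows of the rotated image, state (X, Y, coordX)
def CourbeStep (st : List Int × List Int × Int) (i : List Int) : List Int × List Int × Int :=
  let coordX := st.2.2 + 1
  let lst := (i.foldl CourbeInnerStep ([], -1)).1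
  if lst.length ≠ 0 then (st.1 ++ [coordX], st.2.1 ++ [PySem.List.pyGetD lst 0 0], coordX)
  else (st.1, st.2.1, coordX)

def Courbe (Image : List (List Int)) : List Int × List Int :=
  let Image2 := (PySem.List.pyRange (((PySem.List.pyGetD Image 0 []).length : Int) - 1) (-1) (-1)).map
    (fun i => (PySem.List.pyRange 0 (Image.length : Int) 1).map
      (fun j => PySem.List.pyGetD (PySem.List.pyGetD Image j []) i 0))
  let st := Image2.foldl CourbeStep ([], [], -1)
  (st.1, st.2.1)

-- ===== PORT B =====
def Courbe_alt (Image : List (List Int)) : List Int × List Int :=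
  let w : Int := ((PySem.List.pyGetD Image 0 []).length : Int)
  let first := (PySem.List.enumerate Image 0).foldl
    (fun d p => (PySem.List.pyRange 0 w 1).foldl
      (fun d col =>
        if PySem.List.pyGetD p.2 col 0 = 0 ∧ d.contains col = false then d.insert col p.1 else d) d)
    PySem.Dict.empty
  (PySem.List.enumerate (PySem.List.pyRange (w - 1) (-1) (-1)) 0).foldl
    (fun st p =>
      if first.contains p.2 then (st.1 ++ [p.1], st.2 ++ [first.getD p.2 0]) else st)
    ([], [])

-- ===== PRECONDITION & SPEC =====
-- Python A raises IndexError on an empty image (Image[0]) and on a ragged image whose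
-- later rows are shorter than row 0 (Image[j][i]); exactly those inputs are excluded.
def Pre_Courbe (Image : List (List Int)) : Prop :=
  Image ≠ [] ∧ ∀ row ∈ Image, (Image.headD []).length ≤ row.length
instance (Image : List (List Int)) : Decidable (Pre_Courbe Image) := by unfold Pre_Courbe; infer_instance
def pvWitness_Courbe : List (List Int) := [[1, 0], [0, 1]]

def Spec_Courbe (Image : List (List Int)) (out : List Int × List Int) : Prop := out = Courbe_alt Image
instance (Image : List (List Int)) (out : List Int × List Int) : Decidable (Spec_Courbe Image out) := by unfold Spec_Courbe; infer_instance

-- ===== CLAIM (what is proved, stated in full; the proofs are below) =====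
def Claim_equal_Courbe : Prop := ∀ (Image : List (List Int)), Dom_Courbe Image → Pre_Courbe Image → Spec_Courbe Image (Courbe Image)

-- ===== LEMMAS AND PROOFS =====
-- first row index (counting from b) whose pixel in column col is black, if any
def pvFirstZero : List (List Int) → Int → Int → Option Int
  | [], _, _ => none
  | r :: rs, col, b => if PySem.List.pyGetD r col 0 = 0 then some b else pvFirstZero rs col (b + 1)

-- indices (starting at s) of the zeros of a list: what A's inner loop accumulates
def pvZlist : List Int → Int → List Int
  | [], _ => []
  | x :: xs, s => (if x = 0 then [s] else []) ++ pvZlist xs (s + 1)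

theorem pvInner_eq (c : List Int) : ∀ (acc : List Int) (k : Int),
    c.foldl CourbeInnerStep (acc, k) = (acc ++ pvZlist c (k + 1), k + c.length) := by
  induction c with
  | nil => intro acc k; simp [pvZlist]
  | cons x xs ih =>
    intro acc k
    simp only [List.foldl_cons, CourbeInnerStep, pvZlist]
    split_ifs with h
    · rw [ih]; simp; omega
    · rw [ih]; simp; omega

theorem pvZlist_head (rows : List (List Int)) (col : Int) : ∀ (s : Int),
    (pvZlist (rows.map (fun r => PySem.List.pyGetD r col 0)) s).head? = pvFirstZero rows col s := by
  induction rows with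
  | nil => intro s; simp [pvZlist, pvFirstZero]
  | cons r rs ih =>
    intro s
    simp only [List.map_cons, pvZlist, pvFirstZero]
    split_ifs with h
    · simp
    · simp [ih]

theorem pvOuter (Image : List (List Int)) (cols : List Int) : ∀ (X Y : List Int) (k : Int),
    (((cols.map (fun i => Image.map (fun row => PySem.List.pyGetD row i 0))).foldl CourbeStep (X, Y, k - 1)).1,
     ((cols.map (fun i => Image.map (fun row => PySem.List.pyGetD row i 0))).foldl CourbeStep (X, Y, k - 1)).2.1)
      = (PySem.List.enumerate cols k).foldl (fun st p =>
          match pvFirstZero Image p.2 0 with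
          | some b => (st.1 ++ [p.1], st.2 ++ [b])
          | none => st) (X, Y) := by
  induction cols with
  | nil => intro X Y k; simp [PySem.List.enumerate_nil]
  | cons col cs ih =>
    intro X Y k
    rw [PySem.List.enumerate_cons]
    simp only [List.map_cons, List.foldl_cons]
    have hin := pvInner_eq (Image.map (fun row => PySem.List.pyGetD row col 0)) [] (-1)
    have hz := pvZlist_head Image col 0
    have hk : k - 1 + 1 = k := by ring
    have h0 : (-1 : Int) + 1 = 0 := by ring
    rw [h0] at hin
    cases hfind : pvFirstZero Image col 0 with
    | none =>
      rw [hfind] at hz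
      have hnil := List.head?_eq_none_iff.mp hz
      have hstep : CourbeStep (X, Y, k - 1) (Image.map (fun row => PySem.List.pyGetD row col 0))
          = (X, Y, k) := by
        simp [CourbeStep, hk, hin, hnil]
      rw [hstep]
      have h := ih X Y (k + 1)
      rw [show k + 1 - 1 = k from by ring] at h
      exact h
    | some b =>
      rw [hfind] at hz
      have hstep : CourbeStep (X, Y, k - 1) (Image.map (fun row => PySem.List.pyGetD row col 0))
          = (X ++ [k], Y ++ [b], k) := by
        cases hl : pvZlist (Image.map (fun r => PySem.List.pyGetD r col 0)) 0 with
        | nil => rw [hl] at hz; simp at hz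
        | cons z zs =>
          rw [hl] at hz
          simp at hz
          subst hz
          simp only [CourbeStep]
          rw [hin]
          simp only [List.nil_append]
          rw [hl, hk]
          simp [PySem.List.pyGetD, PySem.List.pyGet?, PySem.List.pyIdx?]
      rw [hstep]
      have h := ih (X ++ [k]) (Y ++ [b]) (k + 1)
      rw [show k + 1 - 1 = k from by ring] at h
      exact h

-- one row of B's dictionary pass: the dict gains b at exactly the fresh black columns of the row
theorem pvDictRow (row : List Int) (b : Int) : ∀ (L : List Int) (d : PySem.Dict Int Int) (col : Int),
    (L.foldl (fun d c =>
        if PySem.List.pyGetD row c 0 = 0 ∧ d.contains c = false then d.insert c b else d) d).get? col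
      = if col ∈ L ∧ PySem.List.pyGetD row col 0 = 0 ∧ d.get? col = none then some b
        else d.get? col := by
  intro L
  induction L with
  | nil => intro d col; simp
  | cons c rest ih =>
    intro d col
    simp only [List.foldl_cons]
    by_cases hz : PySem.List.pyGetD row c 0 = 0 ∧ d.contains c = false
    · rw [if_pos hz, ih]
      by_cases hc : col = c
      · subst hc
        have hsome : (d.insert col b).get? col = some b := PySem.Dict.get?_insert_self d col b
        have hnone : d.get? col = none := by
          have := PySem.Dict.contains_eq_isSome_get? d col
          rw [hz.2] at this
          exact Option.not_isSome_iff_eq_none.mp (by simp [← this])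
        simp [hsome, hnone, hz.1]
      · rw [PySem.Dict.get?_insert_of_ne d b hc]
        simp [List.mem_cons, hc]
    · rw [if_neg hz, ih]
      by_cases hc : col = c
      · subst hc
        by_cases hn : PySem.List.pyGetD row col 0 = 0 ∧ d.get? col = none
        · exfalso
          apply hz
          refine ⟨hn.1, ?_⟩
          rw [PySem.Dict.contains_eq_isSome_get? d col, hn.2]
          rfl
        · have h1 : ¬ (col ∈ rest ∧ PySem.List.pyGetD row col 0 = 0 ∧ d.get? col = none) := by
            intro h; exact hn ⟨h.2.1, h.2.2⟩
          have h2 : ¬ (col ∈ col :: rest ∧ PySem.List.pyGetD row col 0 = 0 ∧ d.get? col = none) := by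
            intro h; exact hn ⟨h.2.1, h.2.2⟩
          rw [if_neg h1, if_neg h2]
      · simp [List.mem_cons, hc]

-- the whole dictionary pass: lookup of a column in range gives the first black row
theorem pvDictRows (w : Int) : ∀ (rows : List (List Int)) (b0 : Int) (d : PySem.Dict Int Int) (col : Int),
    ((PySem.List.enumerate rows b0).foldl
        (fun d p => (PySem.List.pyRange 0 w 1).foldl
          (fun d c =>
            if PySem.List.pyGetD p.2 c 0 = 0 ∧ d.contains c = false then d.insert c p.1 else d) d) d).get? col
      = if col ∈ PySem.List.pyRange 0 w 1 ∧ d.get? col = none then pvFirstZero rows col b0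
        else d.get? col := by
  intro rows
  induction rows with
  | nil =>
    intro b0 d col
    simp only [PySem.List.enumerate_nil, List.foldl_nil, pvFirstZero]
    split_ifs with h
    · exact h.2
    · rfl
  | cons r rs ih =>
    intro b0 d col
    rw [PySem.List.enumerate_cons]
    simp only [List.foldl_cons]
    rw [ih (b0 + 1) _ col, pvDictRow r b0 (PySem.List.pyRange 0 w 1) d col]
    simp only [pvFirstZero]
    by_cases hP : col ∈ PySem.List.pyRange 0 w 1
    · by_cases hN : d.get? col = none
      · by_cases hZ : PySem.List.pyGetD r col 0 = 0
        · simp [hP, hN, hZ]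
        · simp [hP, hN, hZ]
      · simp [hP, hN]
    · simp [hP]

-- ===== VERDICT (by name: the statement is the Claim_ definition above) =====
theorem Courbe_spec : Claim_equal_Courbe := by
  intro Image _ _
  unfold Spec_Courbe Courbe Courbe_alt
  have hrot : (fun i => (PySem.List.pyRange 0 (Image.length : Int) 1).map
      (fun j => PySem.List.pyGetD (PySem.List.pyGetD Image j []) i 0))
      = (fun i => Image.map (fun row => PySem.List.pyGetD row i 0)) := by
    funext i
    calc (PySem.List.pyRange 0 (Image.length : Int) 1).map
          (fun j => PySem.List.pyGetD (PySem.List.pyGetD Image j []) i 0)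
        = ((PySem.List.pyRange 0 (Image.length : Int) 1).map
            (fun j => PySem.List.pyGetD Image j [])).map (fun row => PySem.List.pyGetD row i 0) := by
          rw [List.map_map]; rfl
      _ = Image.map (fun row => PySem.List.pyGetD row i 0) := by
          rw [PySem.List.map_pyGetD_pyRange_zero' Image ([] : List Int)]
  simp only [hrot]
  -- name the width and the dictionary built by B's first pass
  set w : Int := ((PySem.List.pyGetD Image 0 []).length : Int) with hw
  set first : PySem.Dict Int Int := (PySem.List.enumerate Image 0).foldl
    (fun d p => (PySem.List.pyRange 0 w 1).foldl
      (fun d col =>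
        if PySem.List.pyGetD p.2 col 0 = 0 ∧ d.contains col = false then d.insert col p.1 else d) d)
    PySem.Dict.empty with hfirst
  -- B's lookup pass equals the fold on pvFirstZero: columns of the countdown range are in [0, w)
  have hcong : (PySem.List.enumerate (PySem.List.pyRange (w - 1) (-1) (-1)) 0).foldl
      (fun st p =>
        if first.contains p.2 then (st.1 ++ [p.1], st.2 ++ [first.getD p.2 0]) else st) ([], [])
      = (PySem.List.enumerate (PySem.List.pyRange (w - 1) (-1) (-1)) 0).foldl
        (fun st p =>
          match pvFirstZero Image p.2 0 with
          | some b => (st.1 ++ [p.1], st.2 ++ [b])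
          | none => st) ([], []) := by
    apply PySem.List.foldl_congr_mem
    intro st p hp
    have hmem : p.2 ∈ PySem.List.pyRange (w - 1) (-1) (-1) := by
      rcases (PySem.List.mem_enumerate_iff _ _ _).mp hp with ⟨k, hk, rfl⟩
      exact List.getElem_mem hk
    have hrange : p.2 ∈ PySem.List.pyRange 0 w 1 := by
      have h1 := PySem.List.mem_pyRange_neg_one.mp hmem
      exact PySem.List.mem_pyRange_one.mpr ⟨by omega, by omega⟩
    have hget : first.get? p.2 = pvFirstZero Image p.2 0 := by
      rw [hfirst, pvDictRows w Image 0 PySem.Dict.empty p.2]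
      simp [hrange, PySem.Dict.get?_empty]
    rw [PySem.Dict.contains_eq_isSome_get? first p.2, PySem.Dict.getD_eq_get?_getD, hget]
    cases pvFirstZero Image p.2 0 with
    | none => rfl
    | some b => rfl
  rw [hcong]
  have h := pvOuter Image (PySem.List.pyRange (w - 1) (-1) (-1)) [] [] 0
  rw [show (0 : Int) - 1 = -1 from by ring] at h
  exact h
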